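-- pv_equiv track=rewrite | github.com/MrBrantCode/unitest_baseline | mut_generate/mist_train_taco/taco_8546/solution.py | count_chess_triangle_ways
-- ===== SOURCE A (Python) =====
-- def count_chess_triangle_ways(n, m):
--     # Define the dimensions for which we need to calculate the number of ways
--     dimensions = [(3, 4), (3, 3), (2, 4), (2, 3)]
--
--     # Initialize the total count of ways
--     total_ways = 0
--
--     # Iterate over each dimension
--     for dim in dimensions:
--         x, y = dim
--         # Check if the dimension fits within the board size
--         if x <= n and y <= m:
--             # Calculate the number of ways for this dimension
--             ways = 8 * (n - x + 1) * (m - y + 1)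
--             # Add to the total count
--             total_ways += ways
--
--     return total_ways
-- ===== SOURCE B (Python) =====
-- def count_chess_triangle_ways(n, m):
--     # Interval-counting view: a triangle placement is 8 orientations of a
--     # bounding box whose width is a subinterval of length 2..3 of the n rows
--     # and whose height is a subinterval of length 3..4 of the m columns.
--     # Count subintervals of length <= L with a triangular-number formula and
--     # take prefix differences instead of looping over dimension pairs.
--     def upto(size, L):
--         # number of subintervals of [1..size] with length between 1 and L
--         k = max(0, min(L, size))
--         return k * size - k * (k - 1) // 2
--     xs = upto(n, 3) - upto(n, 1)   # widths in {2,3}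
--     ys = upto(m, 4) - upto(m, 2)   # heights in {3,4}
--     return 8 * xs * ys
-- ===== Notes on version B (the rewrite author's own statement) =====
-- stated objective: alternative
-- what changed: Replaced the guarded loop over the four box dimensions by an interval-counting formulation: subintervals of length at most L are counted with a triangular-number formula and the widths in {2,3} / heights in {3,4} are obtained as prefix-count differences, then multiplied.
import Mathlib
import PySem

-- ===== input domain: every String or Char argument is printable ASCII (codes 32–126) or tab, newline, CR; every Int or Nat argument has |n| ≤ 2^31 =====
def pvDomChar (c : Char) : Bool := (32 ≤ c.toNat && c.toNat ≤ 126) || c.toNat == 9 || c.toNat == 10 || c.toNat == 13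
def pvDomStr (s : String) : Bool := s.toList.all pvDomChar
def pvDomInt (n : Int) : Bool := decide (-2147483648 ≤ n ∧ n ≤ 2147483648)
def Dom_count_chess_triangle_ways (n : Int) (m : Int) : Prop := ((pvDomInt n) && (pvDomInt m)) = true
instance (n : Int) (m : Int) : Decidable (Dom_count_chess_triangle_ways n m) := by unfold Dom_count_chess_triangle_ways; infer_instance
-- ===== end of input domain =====

-- ===== PORT A =====
-- B recasts the guarded dimension loop as interval counting via triangular-number prefix differences (objective: alternative).
def count_chess_triangle_ways (n : Int) (m : Int) : Int :=
  let dimensions : List (Int × Int) := [(3, 4), (3, 3), (2, 4), (2, 3)]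
  dimensions.foldl (fun total_ways dim =>
    let x := dim.1
    let y := dim.2
    if x ≤ n ∧ y ≤ m then total_ways + 8 * (n - x + 1) * (m - y + 1)
    else total_ways) 0

-- ===== PORT B =====
-- number of subintervals of [1..size] with length between 1 and L
def pvUpto (size : Int) (L : Int) : Int :=
  let k := max 0 (min L size)
  k * size - PySem.Int.floordiv (k * (k - 1)) 2

def count_chess_triangle_ways_alt (n : Int) (m : Int) : Int :=
  let xs := pvUpto n 3 - pvUpto n 1
  let ys := pvUpto m 4 - pvUpto m 2
  8 * xs * ys

-- ===== PRECONDITION & SPEC =====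
def Spec_count_chess_triangle_ways (n : Int) (m : Int) (out : Int) : Prop := out = count_chess_triangle_ways_alt n m
instance (n : Int) (m : Int) (out : Int) : Decidable (Spec_count_chess_triangle_ways n m out) := by unfold Spec_count_chess_triangle_ways; infer_instance

-- ===== CLAIM (what is proved, stated in full; the proofs are below) =====
def Claim_equal_count_chess_triangle_ways : Prop := ∀ (n : Int) (m : Int), Dom_count_chess_triangle_ways n m → Spec_count_chess_triangle_ways n m (count_chess_triangle_ways n m)

-- ===== LEMMAS AND PROOFS =====

-- widths factor: prefix difference equals the two guarded width counts
lemma pvUpto_x (n : Int) : pvUpto n 3 - pvUpto n 1 = max 0 (n - 1) + max 0 (n - 2) := by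
  simp only [pvUpto]
  rcases le_or_gt 3 n with h | h
  · have e3 : max 0 (min 3 n) = 3 := by omega
    have e1 : max 0 (min 1 n) = 1 := by omega
    rw [e3, e1]
    have f3 : PySem.Int.floordiv (3 * (3 - 1)) 2 = 3 := by decide
    have f1 : PySem.Int.floordiv (1 * (1 - 1)) 2 = 0 := by decide
    rw [f3, f1]; omega
  · rcases le_or_gt 0 n with h0 | h0
    · interval_cases n <;> decide
    · have e3 : max 0 (min 3 n) = 0 := by omega
      have e1 : max 0 (min 1 n) = 0 := by omega
      rw [e3, e1]
      have f0 : PySem.Int.floordiv (0 * (0 - 1)) 2 = 0 := by decide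
      rw [f0]; omega

-- heights factor
lemma pvUpto_y (m : Int) : pvUpto m 4 - pvUpto m 2 = max 0 (m - 2) + max 0 (m - 3) := by
  simp only [pvUpto]
  rcases le_or_gt 4 m with h | h
  · have e4 : max 0 (min 4 m) = 4 := by omega
    have e2 : max 0 (min 2 m) = 2 := by omega
    rw [e4, e2]
    have f4 : PySem.Int.floordiv (4 * (4 - 1)) 2 = 6 := by decide
    have f2 : PySem.Int.floordiv (2 * (2 - 1)) 2 = 1 := by decide
    rw [f4, f2]; omega
  · rcases le_or_gt 0 m with h0 | h0
    · interval_cases m <;> decide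
    · have e4 : max 0 (min 4 m) = 0 := by omega
      have e2 : max 0 (min 2 m) = 0 := by omega
      rw [e4, e2]
      have f0 : PySem.Int.floordiv (0 * (0 - 1)) 2 = 0 := by decide
      rw [f0]; omega

-- ===== VERDICT (by name: the statement is the Claim_ definition above) =====
set_option maxHeartbeats 1000000 in
theorem count_chess_triangle_ways_spec : Claim_equal_count_chess_triangle_ways := by
  intro n m _
  unfold Spec_count_chess_triangle_ways count_chess_triangle_ways count_chess_triangle_ways_alt
  simp only [List.foldl]
  rw [pvUpto_x, pvUpto_y]
  rcases max_cases 0 (n - 1) with ⟨e1, l1⟩ | ⟨e1, l1⟩ <;>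
    rcases max_cases 0 (n - 2) with ⟨e2, l2⟩ | ⟨e2, l2⟩ <;>
      rcases max_cases 0 (m - 2) with ⟨e3, l3⟩ | ⟨e3, l3⟩ <;>
        rcases max_cases 0 (m - 3) with ⟨e4, l4⟩ | ⟨e4, l4⟩ <;>
          rw [e1, e2, e3, e4] <;> split_ifs <;> first | (exfalso; omega) | ring
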